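-- pv_equiv track=rewrite | github.com/gganetlepage/RouteInspectionProblem | main.py | vertices_cycle
-- ===== SOURCE A (Python) =====
-- def vertices_of_a_edge_list(cycle, new_edges):
--     size = len(cycle)
--     vertices_list = []
--     for i in range(size):  # create a list indicating the vertices and the edge concerned
--         edge_index = cycle[i]
--         edge = new_edges[edge_index]
--         vertices_list.append([edge[0], edge_index, i])  # i is the edge index in the cycle
--         vertices_list.append([edge[1], edge_index, i])
--     return vertices_list
--
-- def partition(vertices_list, low, high):
--     pivot = vertices_list[high][0]  # element used for comparaison
--     i = low - 1  # index used to swap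
--     for j in range(low, high):
--         if vertices_list[j][0] < pivot:
--             i += 1
--             vertices_list[i], vertices_list[j] = vertices_list[j], vertices_list[i]
--     vertices_list[i + 1], vertices_list[high] = vertices_list[high], vertices_list[i + 1]
--     return i + 1  # index of pi
--
-- def quicksort(vertices_list, low, high):
--     if high <= low:
--         return "Error in indexes"
--     else:
--
--         pi = partition(vertices_list, low,
--                        high)  # pi is partitioning index, verticesl_list[pi] is now at the right place
--         quicksort(vertices_list, low, pi - 1)  # before pi
--         quicksort(vertices_list, pi + 1, high)  # after pi
--
-- def reducing_list(
--         vertices_list):  # each vertex is occuring twice in the vertices_list, we only it once it fasten the method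
--     reduced_list = []
--     size = len(vertices_list)
--     steps = int(size / 2)
--     for i in range(steps):
--         reduced_list.append(vertices_list[2 * i])
--     return reduced_list
--
-- def vertices_cycle(cycle_list, new_edges):
--     vertices_list = []
--     for x in cycle_list:
--         y = vertices_of_a_edge_list(x, new_edges)
--         quicksort(y, 0, len(y) - 1)
--         reduced_list = reducing_list(y)
--         vertices_list.append(reduced_list)
--     return vertices_list
-- ===== SOURCE B (Python) =====
-- # B: same Lomuto partition, but the recursive quicksort is replaced by an iterative
-- # explicit-stack driver (left range popped first, so the permutation is identical),
-- # vertex triples are built by a comprehension and the representatives taken by a slice.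
-- def _iter_quicksort(a):
--     stack = [(0, len(a) - 1)]
--     while stack:
--         low, high = stack.pop()
--         if high <= low:
--             continue
--         pivot = a[high][0]
--         i = low - 1
--         for j in range(low, high):
--             if a[j][0] < pivot:
--                 i += 1
--                 a[i], a[j] = a[j], a[i]
--         a[i + 1], a[high] = a[high], a[i + 1]
--         pi = i + 1
--         stack.append((pi + 1, high))
--         stack.append((low, pi - 1))  # popped first: left range is sorted first
--
-- def vertices_cycle(cycle_list, new_edges):
--     result = []
--     for cycle in cycle_list:
--         ys = [[new_edges[e][k], e, i] for i, e in enumerate(cycle) for k in (0, 1)]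
--         _iter_quicksort(ys)
--         result.append(ys[::2])
--     return result
-- ===== Notes on version B (the rewrite author's own statement) =====
-- stated objective: alternative
-- what changed: The recursive quicksort is replaced by an iterative driver over an explicit stack of (low, high) ranges (left subrange pushed last so it is popped first, giving the byte-identical permutation); triple-building becomes an enumerate comprehension and the even-index reduction loop becomes a slice ys[::2].
import Mathlib
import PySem

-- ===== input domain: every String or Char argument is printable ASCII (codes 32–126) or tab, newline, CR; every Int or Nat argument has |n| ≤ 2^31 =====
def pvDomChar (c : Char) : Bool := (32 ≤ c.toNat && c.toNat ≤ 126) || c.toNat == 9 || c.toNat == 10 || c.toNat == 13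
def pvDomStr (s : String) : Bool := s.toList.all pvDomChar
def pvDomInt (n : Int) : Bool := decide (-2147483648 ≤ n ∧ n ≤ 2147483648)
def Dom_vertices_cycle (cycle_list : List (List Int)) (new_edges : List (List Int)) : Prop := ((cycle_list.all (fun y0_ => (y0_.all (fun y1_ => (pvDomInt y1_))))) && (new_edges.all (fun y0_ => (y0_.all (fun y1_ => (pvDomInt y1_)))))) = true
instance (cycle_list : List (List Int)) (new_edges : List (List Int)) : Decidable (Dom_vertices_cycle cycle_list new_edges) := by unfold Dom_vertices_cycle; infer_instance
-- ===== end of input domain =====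

-- B replaces the recursive quicksort with an iterative explicit-stack driver (left range
-- popped first, same partition, so the permutation is identical); triples are built by an
-- enumerate comprehension and the even-index reduction by a slice.  A and B mutate only
-- lists they build themselves, so the arguments are untouched by both.

-- ===== PORT A =====
-- a[j][0]: entries are always 3-element triples, so headD 0 is exact at every reachable index.
def pvKey (l : List (List Int)) (j : Int) : Int :=
  (PySem.List.pyGetD l j ([] : List Int)).headD 0

-- a[i], a[j] = a[j], a[i]  (RHS read first, then assigned); indices are in range at every
-- reachable call, where pySetD/pyGetD are exact.
def pvSwap (l : List (List Int)) (a b : Int) : List (List Int) :=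
  PySem.List.pySetD (PySem.List.pySetD l a (PySem.List.pyGetD l b [])) b (PySem.List.pyGetD l a [])

-- the 'for j in range(low, high)' loop of partition, carrying (i, vertices_list);
-- fuel = number of remaining iterations (high - j), a structural totality guard
def partLoop (fuel : Nat) (l : List (List Int)) (pivot i j : Int) : Int × List (List Int) :=
  match fuel with
  | 0 => (i, l)
  | fuel + 1 =>
    if pvKey l j < pivot then partLoop fuel (pvSwap l (i + 1) j) pivot (i + 1) (j + 1)
    else partLoop fuel l pivot i (j + 1)

-- partition(vertices_list, low, high): returns (pi, updated list)
def pvPartition (l : List (List Int)) (low high : Int) : Int × List (List Int) :=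
  let pivot := pvKey l high
  let r := partLoop (high - low).toNat l pivot (low - 1) low
  (r.1 + 1, pvSwap r.2 (r.1 + 1) high)

-- quicksort(vertices_list, low, high); the Python returns an ignored error string on the
-- base case and otherwise mutates vertices_list, so the port returns the resulting list.
-- fuel bounds the recursion depth (a structural totality guard; the caller passes enough).
def quicksortA (fuel : Nat) (l : List (List Int)) (low high : Int) : List (List Int) :=
  match fuel with
  | 0 => l
  | fuel + 1 =>
    if high ≤ low then l
    else
      let p := pvPartition l low high
      quicksortA fuel (quicksortA fuel p.2 low (p.1 - 1)) (p.1 + 1) high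

-- vertices_of_a_edge_list; cycle[i] is exact (i < len), new_edges[edge_index] and edge[0]/edge[1]
-- via pyGet? (none = IndexError, excluded by Pre_; getD is never reached under Pre_)
def verticesOfA (cycle : List Int) (new_edges : List (List Int)) : List (List Int) :=
  (List.range cycle.length).foldl
    (fun vl i =>
      let e := cycle.getD i 0
      let edge := (PySem.List.pyGet? new_edges e).getD []
      (vl ++ [[(PySem.List.pyGet? edge 0).getD 0, e, (i : Int)]])
        ++ [[(PySem.List.pyGet? edge 1).getD 0, e, (i : Int)]]) []

-- reducing_list; int(size/2) = size / 2 for a Nat size; vertices_list[2*i] is exact (2*i < size)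
def reducingA (l : List (List Int)) : List (List Int) :=
  (List.range (l.length / 2)).foldl (fun acc i => acc ++ [l.getD (2 * i) []]) []

def vertices_cycle (cycle_list : List (List Int)) (new_edges : List (List Int)) : List (List (List Int)) :=
  cycle_list.foldl
    (fun acc x =>
      let y := verticesOfA x new_edges
      acc ++ [reducingA (quicksortA y.length y 0 ((y.length : Int) - 1))]) []

-- ===== PORT B =====
-- the comprehension [[new_edges[e][k], e, i] for i, e in enumerate(cycle) for k in (0, 1)]
def verticesOfB (cycle : List Int) (new_edges : List (List Int)) : List (List Int) :=
  (PySem.List.enumerate cycle).flatMap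
    (fun ie =>
      [(0 : Int), 1].map
        (fun k => [(PySem.List.pyGet? ((PySem.List.pyGet? new_edges ie.2).getD []) k).getD 0, ie.2, ie.1]))

-- _iter_quicksort's while loop over the explicit stack of (low, high) ranges;
-- fuel bounds the number of pops (a structural totality guard; the caller passes enough)
def quicksortB (fuel : Nat) (l : List (List Int)) (stack : List (Int × Int)) : List (List Int) :=
  match fuel with
  | 0 => l
  | fuel + 1 =>
    match stack with
    | [] => l
    | (low, high) :: rest =>
      if high ≤ low then quicksortB fuel l rest
      else
        let p := pvPartition l low high
        quicksortB fuel p.2 ((low, p.1 - 1) :: (p.1 + 1, high) :: rest)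

-- ys[::2]: every second element, hand-ported (exact for every list)
def everyOther : List (List Int) → List (List Int)
  | [] => []
  | [x] => [x]
  | x :: _ :: t => x :: everyOther t

def vertices_cycle_alt (cycle_list : List (List Int)) (new_edges : List (List Int)) : List (List (List Int)) :=
  cycle_list.map
    (fun cycle =>
      let ys := verticesOfB cycle new_edges
      everyOther (quicksortB (2 * ys.length + 2) ys [(0, (ys.length : Int) - 1)]))

-- ===== PRECONDITION & SPEC =====
-- Pre_ excludes exactly the inputs where Python A raises an IndexError: some edge index of
-- some cycle is out of range for new_edges (negative wraparound allowed, as in Python), or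
-- the referenced edge has fewer than 2 entries.
def Pre_vertices_cycle (cycle_list : List (List Int)) (new_edges : List (List Int)) : Prop :=
  ∀ c ∈ cycle_list, ∀ e ∈ c,
    PySem.Raise.InRange new_edges.length e ∧ 2 ≤ (PySem.List.pyGetD new_edges e []).length
instance (cycle_list : List (List Int)) (new_edges : List (List Int)) : Decidable (Pre_vertices_cycle cycle_list new_edges) := by unfold Pre_vertices_cycle; infer_instance

def pvWitness_vertices_cycle : List (List Int) × List (List Int) := ([[0, 0], [0]], [[1, 2]])

def Spec_vertices_cycle (cycle_list : List (List Int)) (new_edges : List (List Int)) (out : List (List (List Int))) : Prop := out = vertices_cycle_alt cycle_list new_edges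
instance (cycle_list : List (List Int)) (new_edges : List (List Int)) (out : List (List (List Int))) : Decidable (Spec_vertices_cycle cycle_list new_edges out) := by unfold Spec_vertices_cycle; infer_instance

-- ===== CLAIM (what is proved, stated in full; the proofs are below) =====
def Claim_equal_vertices_cycle : Prop := ∀ (cycle_list : List (List Int)) (new_edges : List (List Int)), Dom_vertices_cycle cycle_list new_edges → Pre_vertices_cycle cycle_list new_edges → Spec_vertices_cycle cycle_list new_edges (vertices_cycle cycle_list new_edges)

-- ===== LEMMAS AND PROOFS =====

theorem partLoop_fst_bounds (fuel : Nat) (l : List (List Int)) (pivot i j : Int) :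
    i ≤ (partLoop fuel l pivot i j).1 ∧ (partLoop fuel l pivot i j).1 ≤ i + fuel := by
  induction fuel generalizing l i j with
  | zero => simp [partLoop]
  | succ fuel ih =>
    rw [partLoop]
    split
    · have := ih (pvSwap l (i + 1) j) (i + 1) (j + 1); omega
    · have := ih l i (j + 1); omega

theorem pvPartition_fst_bounds (l : List (List Int)) (low high : Int) (h : low < high) :
    low ≤ (pvPartition l low high).1 ∧ (pvPartition l low high).1 ≤ high := by
  have := partLoop_fst_bounds (high - low).toNat l (pvKey l high) (low - 1) low
  simp only [pvPartition]
  omega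

-- proof-only mirror of quicksortA without the fuel guard (well-founded on the range size)
def qsA (l : List (List Int)) (low high : Int) : List (List Int) :=
  if high ≤ low then l
  else
    let p := pvPartition l low high
    qsA (qsA p.2 low (p.1 - 1)) (p.1 + 1) high
termination_by (high - low).toNat
decreasing_by
  · have := pvPartition_fst_bounds l low high (by omega); omega
  · have := pvPartition_fst_bounds l low high (by omega); omega

-- proof-only mirror of quicksortB without the fuel guard (well-founded on the stack measure)
def qsMeasure : List (Int × Int) → Nat
  | [] => 0
  | (lo, hi) :: rest => 2 * (hi - lo + 1).toNat + 1 + qsMeasure rest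

def qsB (l : List (List Int)) (stack : List (Int × Int)) : List (List Int) :=
  match stack with
  | [] => l
  | (low, high) :: rest =>
    if high ≤ low then qsB l rest
    else
      let p := pvPartition l low high
      qsB p.2 ((low, p.1 - 1) :: (p.1 + 1, high) :: rest)
termination_by qsMeasure stack
decreasing_by
  · simp [qsMeasure]
  · have := pvPartition_fst_bounds l low high (by omega); simp [qsMeasure]; omega

theorem quicksortA_adequate (fuel : Nat) (l : List (List Int)) (low high : Int)
    (h : (high - low).toNat ≤ fuel) : quicksortA fuel l low high = qsA l low high := by
  induction fuel generalizing l low high with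
  | zero =>
    rw [quicksortA, qsA]
    simp [show high ≤ low by omega]
  | succ fuel ih =>
    rw [quicksortA, qsA]
    split
    · rfl
    · next hlt =>
      have hb := pvPartition_fst_bounds l low high (by omega)
      rw [ih _ _ _ (by omega), ih _ _ _ (by omega)]

theorem quicksortB_adequate (fuel : Nat) (l : List (List Int)) (stack : List (Int × Int))
    (h : qsMeasure stack ≤ fuel) : quicksortB fuel l stack = qsB l stack := by
  induction fuel generalizing l stack with
  | zero =>
    match stack with
    | [] => rw [quicksortB, qsB]
    | (lo, hi) :: rest => simp [qsMeasure] at h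
  | succ fuel ih =>
    match stack with
    | [] => rw [quicksortB, qsB]
    | (low, high) :: rest =>
      rw [quicksortB, qsB]
      simp only [qsMeasure] at h
      split
      · exact ih _ _ (by omega)
      · next hlt =>
        have hb := pvPartition_fst_bounds l low high (by omega)
        exact ih _ _ (by simp only [qsMeasure]; omega)

theorem qsB_nil (l : List (List Int)) : qsB l [] = l := by
  rw [qsB]

theorem qsB_cons (l : List (List Int)) (low high : Int) (rest : List (Int × Int)) :
    qsB l ((low, high) :: rest) = qsB (qsA l low high) rest := by
  fun_induction qsA l low high generalizing rest with
  | case1 l low high h =>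
    rw [qsB]
    simp [h]
  | case2 l low high h p ih1 ih2 ih3 =>
    rw [qsB]
    simp only [if_neg h]
    rw [ih2, ih3]

theorem length_pvSwap (l : List (List Int)) (a b : Int) : (pvSwap l a b).length = l.length := by
  simp [pvSwap, PySem.List.length_pySetD]

theorem length_partLoop (fuel : Nat) (l : List (List Int)) (pivot i j : Int) :
    (partLoop fuel l pivot i j).2.length = l.length := by
  induction fuel generalizing l i j with
  | zero => simp [partLoop]
  | succ fuel ih => rw [partLoop]; split <;> simp [ih, length_pvSwap]

theorem length_pvPartition (l : List (List Int)) (low high : Int) :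
    (pvPartition l low high).2.length = l.length := by
  simp only [pvPartition, length_pvSwap, length_partLoop]

theorem length_qsA (l : List (List Int)) (low high : Int) :
    (qsA l low high).length = l.length := by
  fun_induction qsA l low high <;> simp_all [length_pvPartition]
  · exact length_pvPartition _ _ _

theorem map_range_getD_even (l : List (List Int)) (h : l.length % 2 = 0) :
    (List.range (l.length / 2)).map (fun i => l.getD (2 * i) []) = everyOther l := by
  fun_induction everyOther l with
  | case1 => simp
  | case2 x => simp at h
  | case3 x y t ih =>
    have hlen : (x :: y :: t).length = t.length + 2 := by simp
    rw [hlen]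
    have h2 : (t.length + 2) / 2 = t.length / 2 + 1 := by omega
    rw [h2, List.range_succ_eq_map]
    simp only [List.map_cons, List.map_map]
    have ht : t.length % 2 = 0 := by simp at h; omega
    rw [← ih ht]
    simp
    intro i _
    have h3 : 2 * (i + 1) = 2 * i + 1 + 1 := by omega
    simp [h3]

theorem reducingA_eq (l : List (List Int)) (h : l.length % 2 = 0) :
    reducingA l = everyOther l := by
  rw [reducingA, PySem.List.foldl_append_singleton_eq_map]
  simp only [List.nil_append]
  exact map_range_getD_even l h

theorem flatMap_pair_length {α β : Type} (xs : List α) (f g : α → β) :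
    (xs.flatMap (fun x => [f x, g x])).length = 2 * xs.length := by
  induction xs <;> simp_all <;> omega

theorem length_verticesOfB (c : List Int) (ne : List (List Int)) :
    (verticesOfB c ne).length = 2 * c.length := by
  unfold verticesOfB
  simp only [List.map_cons, List.map_nil]
  rw [flatMap_pair_length]
  simp [PySem.List.length_enumerate]

theorem enum_eq (c : List Int) (s : Int) :
    PySem.List.enumerate c s = (List.range c.length).map (fun (i : Nat) => (s + (i : Int), c.getD i 0)) := by
  induction c generalizing s with
  | nil => simp [PySem.List.enumerate_nil]
  | cons x t ih =>
    rw [PySem.List.enumerate_cons, ih (s + 1)]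
    simp only [List.length_cons, List.range_succ_eq_map, List.map_cons, List.map_map]
    congr 1
    · simp
    · apply List.map_congr_left
      intro i _
      simp [Function.comp]
      omega

theorem verticesOf_eq (c : List Int) (ne : List (List Int)) :
    verticesOfA c ne = verticesOfB c ne := by
  unfold verticesOfA verticesOfB
  rw [enum_eq c 0]
  simp only [List.append_assoc]
  rw [show (fun (vl : List (List Int)) (i : Nat) =>
        vl ++ ([[(PySem.List.pyGet? ((PySem.List.pyGet? ne (c.getD i 0)).getD []) 0).getD 0, c.getD i 0, (i : Int)]] ++
          [[(PySem.List.pyGet? ((PySem.List.pyGet? ne (c.getD i 0)).getD []) 1).getD 0, c.getD i 0, (i : Int)]]))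
      = (fun vl i => vl ++
          [[(PySem.List.pyGet? ((PySem.List.pyGet? ne (c.getD i 0)).getD []) 0).getD 0, c.getD i 0, (i : Int)],
           [(PySem.List.pyGet? ((PySem.List.pyGet? ne (c.getD i 0)).getD []) 1).getD 0, c.getD i 0, (i : Int)]]) from rfl]
  rw [PySem.List.foldl_append_eq_flatMap]
  rw [List.flatMap_map]
  simp [Function.comp]

theorem ports_eq (cl ne : List (List Int)) : vertices_cycle cl ne = vertices_cycle_alt cl ne := by
  unfold vertices_cycle vertices_cycle_alt
  rw [PySem.List.foldl_append_singleton_eq_map]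
  simp only [List.nil_append]
  apply List.map_congr_left
  intro x _
  rw [verticesOf_eq]
  rw [quicksortA_adequate _ _ _ _ (by omega)]
  rw [quicksortB_adequate _ _ _ (by simp only [qsMeasure]; omega)]
  rw [qsB_cons, qsB_nil]
  apply reducingA_eq
  rw [length_qsA, length_verticesOfB]
  omega

-- ===== VERDICT (by name: the statement is the Claim_ definition above) =====
theorem vertices_cycle_spec : Claim_equal_vertices_cycle := by
  intro cl ne _ _
  unfold Spec_vertices_cycle
  exact ports_eq cl ne
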